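-- pv_equiv track=rewrite | github.com/DotKBoy-web/acbp | scripts/dashboard_app.py | guess_day_candidates
-- ===== SOURCE A (Python) =====
-- from typing import Iterable, List, Tuple, Dict, Optional
--
-- DATEY_NAMES = {
--     "day", "date", "visit_day", "visit_date", "appt_day", "appt_date",
--     "admit_day", "admit_date", "discharge_day", "discharge_date",
-- }
--
-- NUMERIC_TYPES = {"smallint", "integer", "bigint", "numeric", "real", "double precision"}
--
-- TEXT_TYPES = {"text", "character varying", "character"}
--
-- DATE_TYPES = {"date"}
--
-- TS_TYPES = {"timestamp without time zone", "timestamp with time zone"}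
--
-- def categorize_type(pg_type: str) -> str:
--     t = pg_type.lower()
--     if t in DATE_TYPES:
--         return "date"
--     if t in TS_TYPES:
--         return "timestamp"
--     if t in TEXT_TYPES:
--         return "text"
--     if t in NUMERIC_TYPES:
--         return "number"
--     return "other"
--
-- def guess_day_candidates(cols: List[Tuple[str, str]]) -> List[str]:
--     # Prefer name+type hints; fall back to any date/timestamp/text
--     by_name = [c for (c,t) in cols if c in DATEY_NAMES and categorize_type(t) in {"date","timestamp","text","number"}]
--     if by_name:
--         return by_name
--     type_pref = [c for (c,t) in cols if categorize_type(t) in {"date","timestamp","text"}]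
--     if type_pref:
--         return type_pref
--     # allow numeric for YYYYMMDD
--     return [c for (c,t) in cols if categorize_type(t) == "number"]
-- ===== SOURCE B (Python) =====
-- DATEY_NAMES = {
--     "day", "date", "visit_day", "visit_date", "appt_day", "appt_date",
--     "admit_day", "admit_date", "discharge_day", "discharge_date",
-- }
--
-- # one table instead of the if-chain of categorize_type
-- TYPE_CATEGORY = {
--     "date": "date",
--     "timestamp without time zone": "timestamp",
--     "timestamp with time zone": "timestamp",
--     "text": "text",
--     "character varying": "text",
--     "character": "text",
--     "smallint": "number",
--     "integer": "number",
--     "bigint": "number",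
--     "numeric": "number",
--     "real": "number",
--     "double precision": "number",
-- }
--
-- def guess_day_candidates(cols):
--     by_name, type_pref, numbers = [], [], []
--     for c, t in cols:
--         cat = TYPE_CATEGORY.get(t.lower(), "other")
--         if c in DATEY_NAMES and cat != "other":
--             by_name.append(c)
--         if cat in ("date", "timestamp", "text"):
--             type_pref.append(c)
--         if cat == "number":
--             numbers.append(c)
--     return by_name or type_pref or numbers
-- ===== Notes on version B (the rewrite author's own statement) =====
-- stated objective: alternative
-- what changed: Replaced A's three separate filter comprehensions (each re-running an if-chain categorizer per column) with a single pass over cols that categorizes each type once via a lookup table and appends the column into up to three independent buckets, then picks the first non-empty bucket.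
import Mathlib
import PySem

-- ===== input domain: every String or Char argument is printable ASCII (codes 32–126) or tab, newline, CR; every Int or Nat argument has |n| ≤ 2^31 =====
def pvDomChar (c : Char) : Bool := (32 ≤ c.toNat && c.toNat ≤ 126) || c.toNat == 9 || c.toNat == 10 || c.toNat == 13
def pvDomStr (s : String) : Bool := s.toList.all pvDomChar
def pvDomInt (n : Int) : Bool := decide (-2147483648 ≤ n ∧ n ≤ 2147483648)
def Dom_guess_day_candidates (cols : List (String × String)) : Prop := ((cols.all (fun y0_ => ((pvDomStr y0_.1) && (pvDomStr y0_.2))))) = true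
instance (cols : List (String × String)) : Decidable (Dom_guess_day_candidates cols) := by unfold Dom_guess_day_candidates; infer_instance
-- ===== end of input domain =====

-- B replaces A's three filter passes (with a per-pass if-chain categorizer) by one bucketing
-- pass over cols using a lookup-table categorizer: objective 'alternative' (same value, same order).

-- ===== PORT A =====
def pvDATEY_NAMES : List String :=
  ["day", "date", "visit_day", "visit_date", "appt_day", "appt_date",
   "admit_day", "admit_date", "discharge_day", "discharge_date"]
def pvNUMERIC_TYPES : List String :=
  ["smallint", "integer", "bigint", "numeric", "real", "double precision"]
def pvTEXT_TYPES : List String := ["text", "character varying", "character"]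
def pvDATE_TYPES : List String := ["date"]
def pvTS_TYPES : List String := ["timestamp without time zone", "timestamp with time zone"]

def categorize_type (pg_type : String) : String :=
  let t := PySem.Str.lower pg_type
  if pvDATE_TYPES.contains t then "date"
  else if pvTS_TYPES.contains t then "timestamp"
  else if pvTEXT_TYPES.contains t then "text"
  else if pvNUMERIC_TYPES.contains t then "number"
  else "other"

def guess_day_candidates (cols : List (String × String)) : List String :=
  let by_name := (cols.filter (fun ct =>
    pvDATEY_NAMES.contains ct.1 &&
      (["date", "timestamp", "text", "number"] : List String).contains (categorize_type ct.2))).map Prod.fst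
  if by_name.isEmpty then
    let type_pref := (cols.filter (fun ct =>
      (["date", "timestamp", "text"] : List String).contains (categorize_type ct.2))).map Prod.fst
    if type_pref.isEmpty then
      (cols.filter (fun ct => categorize_type ct.2 == "number")).map Prod.fst
    else type_pref
  else by_name

-- ===== PORT B =====
def pvTYPE_CATEGORY : PySem.Dict String String := PySem.Dict.ofList
  [("date", "date"),
   ("timestamp without time zone", "timestamp"),
   ("timestamp with time zone", "timestamp"),
   ("text", "text"),
   ("character varying", "text"),
   ("character", "text"),
   ("smallint", "number"),
   ("integer", "number"),
   ("bigint", "number"),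
   ("numeric", "number"),
   ("real", "number"),
   ("double precision", "number")]

-- one iteration of B's single loop: appends ct.1 to each bucket whose condition holds
def pvStep (acc : List String × List String × List String) (ct : String × String) :
    List String × List String × List String :=
  let cat := PySem.Dict.getD pvTYPE_CATEGORY (PySem.Str.lower ct.2) "other"
  (if pvDATEY_NAMES.contains ct.1 && (cat != "other") then acc.1 ++ [ct.1] else acc.1,
   if (["date", "timestamp", "text"] : List String).contains cat then acc.2.1 ++ [ct.1] else acc.2.1,
   if cat == "number" then acc.2.2 ++ [ct.1] else acc.2.2)

def guess_day_candidates_alt (cols : List (String × String)) : List String :=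
  let r := cols.foldl pvStep ([], [], [])
  if r.1.isEmpty then (if r.2.1.isEmpty then r.2.2 else r.2.1) else r.1

-- ===== PRECONDITION & SPEC =====
def Spec_guess_day_candidates (cols : List (String × String)) (out : List String) : Prop := out = guess_day_candidates_alt cols
instance (cols : List (String × String)) (out : List String) : Decidable (Spec_guess_day_candidates cols out) := by unfold Spec_guess_day_candidates; infer_instance

-- ===== CLAIM (what is proved, stated in full; the proofs are below) =====
def Claim_equal_guess_day_candidates : Prop := ∀ (cols : List (String × String)), Dom_guess_day_candidates cols → Spec_guess_day_candidates cols (guess_day_candidates cols)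

-- ===== LEMMAS AND PROOFS =====

-- B's table lookup computes exactly A's categorize_type
theorem pv_cat_eq (t : String) :
    PySem.Dict.getD pvTYPE_CATEGORY (PySem.Str.lower t) "other" = categorize_type t := by
  simp only [categorize_type]
  generalize PySem.Str.lower t = s
  by_cases h1 : s = "date"; · subst h1; decide
  by_cases h2 : s = "timestamp without time zone"; · subst h2; decide
  by_cases h3 : s = "timestamp with time zone"; · subst h3; decide
  by_cases h4 : s = "text"; · subst h4; decide
  by_cases h5 : s = "character varying"; · subst h5; decide
  by_cases h6 : s = "character"; · subst h6; decide
  by_cases h7 : s = "smallint"; · subst h7; decide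
  by_cases h8 : s = "integer"; · subst h8; decide
  by_cases h9 : s = "bigint"; · subst h9; decide
  by_cases h10 : s = "numeric"; · subst h10; decide
  by_cases h11 : s = "real"; · subst h11; decide
  by_cases h12 : s = "double precision"; · subst h12; decide
  have hi : pvTYPE_CATEGORY.items =
    [("date", "date"), ("timestamp without time zone", "timestamp"),
     ("timestamp with time zone", "timestamp"), ("text", "text"),
     ("character varying", "text"), ("character", "text"), ("smallint", "number"),
     ("integer", "number"), ("bigint", "number"), ("numeric", "number"),
     ("real", "number"), ("double precision", "number")] := by decide
  simp only [PySem.Dict.getD, PySem.Dict.get?, hi, List.find?, List.contains,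
    beq_eq_decide]
  simp [pvDATE_TYPES, pvTS_TYPES, pvTEXT_TYPES, pvNUMERIC_TYPES, h1, h2, h3, h4, h5, h6, h7, h8, h9, h10, h11, h12, eq_comm]

-- A's 4-element type set in by_name is exactly "not other"
theorem pv_four_set (t : String) :
    (["date", "timestamp", "text", "number"] : List String).contains (categorize_type t)
      = (categorize_type t != "other") := by
  simp only [categorize_type]
  split_ifs <;> decide

-- B's single fold produces the three filtered projections of A at once
theorem pv_fold_inv (cols : List (String × String)) (a b c : List String) :
    cols.foldl pvStep (a, b, c) =
      (a ++ (cols.filter (fun ct =>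
        pvDATEY_NAMES.contains ct.1 &&
          (PySem.Dict.getD pvTYPE_CATEGORY (PySem.Str.lower ct.2) "other" != "other"))).map Prod.fst,
       b ++ (cols.filter (fun ct =>
        (["date", "timestamp", "text"] : List String).contains
          (PySem.Dict.getD pvTYPE_CATEGORY (PySem.Str.lower ct.2) "other"))).map Prod.fst,
       c ++ (cols.filter (fun ct =>
        PySem.Dict.getD pvTYPE_CATEGORY (PySem.Str.lower ct.2) "other" == "number")).map Prod.fst) := by
  induction cols generalizing a b c with
  | nil => simp
  | cons ct rest ih =>
    simp only [List.foldl_cons, pvStep, List.filter_cons]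
    rw [ih]
    split_ifs <;> simp_all

-- ===== VERDICT (by name: the statement is the Claim_ definition above) =====
theorem guess_day_candidates_spec : Claim_equal_guess_day_candidates := by
  intro cols _
  unfold Spec_guess_day_candidates guess_day_candidates guess_day_candidates_alt
  rw [pv_fold_inv]
  have e1 : cols.filter (fun ct =>
      pvDATEY_NAMES.contains ct.1 &&
        (PySem.Dict.getD pvTYPE_CATEGORY (PySem.Str.lower ct.2) "other" != "other"))
      = cols.filter (fun ct =>
      pvDATEY_NAMES.contains ct.1 &&
        (["date", "timestamp", "text", "number"] : List String).contains (categorize_type ct.2)) :=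
    List.filter_congr (fun ct _ => by rw [pv_cat_eq, pv_four_set])
  have e2 : cols.filter (fun ct =>
      (["date", "timestamp", "text"] : List String).contains
        (PySem.Dict.getD pvTYPE_CATEGORY (PySem.Str.lower ct.2) "other"))
      = cols.filter (fun ct =>
      (["date", "timestamp", "text"] : List String).contains (categorize_type ct.2)) :=
    List.filter_congr (fun ct _ => by rw [pv_cat_eq])
  have e3 : cols.filter (fun ct =>
      PySem.Dict.getD pvTYPE_CATEGORY (PySem.Str.lower ct.2) "other" == "number")
      = cols.filter (fun ct => categorize_type ct.2 == "number") :=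
    List.filter_congr (fun ct _ => by rw [pv_cat_eq])
  simp only [e1, e2, e3, List.nil_append]
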